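-- pv_equiv track=rewrite | github.com/Xeon-Fox/DZDZDZDZDZDZ | пайтон/2024/02.04.2024/1.py | find_same_surnames
-- ===== SOURCE A (Python) =====
-- def find_same_surnames(employees: list):
--     surnames = {}
--     for employee in employees:
--         name, surname = employee.split()
--         if surname not in surnames:
--             surnames[surname] = []
--         surnames[surname].append(name)
--     return {surname: names for surname, names in surnames.items() if len(names) > 1}
-- ===== SOURCE B (Python) =====
-- def find_same_surnames(employees: list):
--     pairs = []
--     for employee in employees:
--         name, surname = employee.split()
--         pairs.append((name, surname))
--     order = list(dict.fromkeys(s for _, s in pairs))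
--     groups = [(s, [n for n, t in pairs if t == s]) for s in order]
--     return {s: names for s, names in groups if len(names) > 1}
-- ===== Notes on version B (the rewrite author's own statement) =====
-- stated objective: alternative
-- what changed: Replaces A's single dict-accumulation pass (append each name into a growing dict of lists) by extracting (name,surname) pairs, deduplicating surnames in first-occurrence order, and rebuilding each group by rescanning the pair list, filtering groups of size > 1 at the end.
import Mathlib
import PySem

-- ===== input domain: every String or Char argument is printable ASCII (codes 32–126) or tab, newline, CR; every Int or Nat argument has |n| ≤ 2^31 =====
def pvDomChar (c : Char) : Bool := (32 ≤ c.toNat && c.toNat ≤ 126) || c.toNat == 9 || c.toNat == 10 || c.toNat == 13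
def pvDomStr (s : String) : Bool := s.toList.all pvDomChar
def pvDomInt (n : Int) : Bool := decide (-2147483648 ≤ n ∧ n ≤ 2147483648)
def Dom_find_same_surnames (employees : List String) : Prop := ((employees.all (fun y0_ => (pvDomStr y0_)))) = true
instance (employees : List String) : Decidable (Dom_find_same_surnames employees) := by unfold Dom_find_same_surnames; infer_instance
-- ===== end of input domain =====

-- B replaces A's dict-accumulation pass by a different decomposition: extract the
-- (name, surname) pairs, dedup the surnames in first-occurrence order, then rebuild
-- each group by rescanning the pairs (alternative structure, not faster).
-- ===== PORT A =====
def find_same_surnames (employees : List String) : List (String × List String) :=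
  let surnames : PySem.Dict String (List String) := employees.foldl (fun surnames employee =>
    match PySem.Str.split₀ employee with
    | [name, surname] =>
        let surnames := if surnames.contains surname then surnames else surnames.insert surname []
        surnames.modify surname [] (fun names => names ++ [name])
    | _ => surnames) PySem.Dict.empty
  -- dict comprehension over surnames.items keeping groups with > 1 name
  ((surnames.items.filter (fun p => p.2.length > 1)).foldl
      (fun d p => d.insert p.1 p.2) PySem.Dict.empty).items

-- ===== PORT B =====
def find_same_surnames_alt (employees : List String) : List (String × List String) :=
  -- `name, surname = employee.split()` hand-ported as a length-2 test plus head
  -- extraction (exact wherever the Python unpacking succeeds, i.e. under Pre_)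
  let pairs : List (String × String) := employees.foldl (fun pairs employee =>
    let ws := PySem.Str.split₀ employee
    if ws.length = 2 then pairs ++ [(ws.headD "", (ws.drop 1).headD "")] else pairs) []
  let order : List String := PySem.List.dedup (pairs.map (fun p => p.2))
  let groups : List (String × List String) := order.map (fun s =>
    (s, (pairs.filter (fun p => p.2 == s)).map (fun p => p.1)))
  -- dict comprehension over groups keeping those with > 1 name
  ((groups.filter (fun p => p.2.length > 1)).foldl
      (fun d p => d.insert p.1 p.2) PySem.Dict.empty).items

-- ===== PRECONDITION & SPEC =====
-- Pre_ excludes exactly the inputs where `name, surname = employee.split()` raises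
-- ValueError (an employee string that does not split into exactly two words).
def Pre_find_same_surnames (employees : List String) : Prop :=
  ∀ e ∈ employees, (PySem.Str.split₀ e).length = 2
instance (employees : List String) : Decidable (Pre_find_same_surnames employees) := by unfold Pre_find_same_surnames; infer_instance
def pvWitness_find_same_surnames : List String :=
  ["Ann Smith", "Bob Smith", "Cid Jones"]
def Spec_find_same_surnames (employees : List String) (out : List (String × List String)) : Prop := out = find_same_surnames_alt employees
instance (employees : List String) (out : List (String × List String)) : Decidable (Spec_find_same_surnames employees out) := by unfold Spec_find_same_surnames; infer_instance

-- ===== CLAIM (what is proved, stated in full; the proofs are below) =====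
def Claim_equal_find_same_surnames : Prop := ∀ (employees : List String), Dom_find_same_surnames employees → Pre_find_same_surnames employees → Spec_find_same_surnames employees (find_same_surnames employees)

-- ===== LEMMAS AND PROOFS =====

-- proof helper: the (name, surname) pair an employee string yields (only used under Pre_)
def pvPairFn (e : String) : String × String :=
  match PySem.Str.split₀ e with
  | [name, surname] => (name, surname)
  | _ => ("", "")

-- setdefault-then-append collapses to a single Python-style modify
theorem setdefault_modify_collapse (d : PySem.Dict String (List String)) (s n : String) :
    ((if d.contains s then d else d.insert s []).modify s [] (fun names => names ++ [n]))
      = d.modify s [] (fun names => names ++ [n]) := by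
  by_cases h : d.contains s = true
  · simp [h]
  · simp only [Bool.not_eq_true] at h
    simp [h, PySem.Dict.modify, PySem.Dict.insert_insert_self, PySem.Dict.getD_insert_self,
      PySem.Dict.getD_of_not_contains d [] h]

-- under Pre_, B's pair-extraction loop is just a map
theorem pairs_eq_map (employees : List String)
    (h : Pre_find_same_surnames employees) :
    employees.foldl (fun pairs employee =>
      let ws := PySem.Str.split₀ employee
      if ws.length = 2 then pairs ++ [(ws.headD "", (ws.drop 1).headD "")] else pairs) []
      = employees.map pvPairFn := by
  rw [PySem.List.foldl_congr_mem _ _ (fun pairs e => pairs ++ [pvPairFn e]) _ ?_,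
    PySem.List.foldl_append_singleton_eq_map, List.nil_append]
  intro acc e he
  have hlen := h e he
  obtain ⟨n, s, hs⟩ := List.length_eq_two.mp hlen
  simp [hs, pvPairFn]

-- under Pre_, A's dict loop is a plain modify-loop over the extracted pairs
theorem dictA_eq (employees : List String)
    (h : Pre_find_same_surnames employees) :
    employees.foldl (fun surnames employee =>
      match PySem.Str.split₀ employee with
      | [name, surname] =>
          let surnames := if surnames.contains surname then surnames else surnames.insert surname []
          surnames.modify surname [] (fun names => names ++ [name])
      | _ => surnames) PySem.Dict.empty
    = (employees.map pvPairFn).foldl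
        (fun d p => d.modify p.2 [] (fun names => names ++ [p.1])) PySem.Dict.empty := by
  rw [List.foldl_map]
  apply PySem.List.foldl_congr_mem
  intro d e he
  have := h e he
  unfold pvPairFn
  match hs : PySem.Str.split₀ e with
  | [n, s] => simpa using setdefault_modify_collapse d s n
  | [] => rw [hs] at this; simp at this
  | [_] => rw [hs] at this; simp at this
  | _ :: _ :: _ :: _ => rw [hs] at this; simp at this

-- the modify-loop keyed on .2 with value .1, reduced to the library lemma via Prod.swap
theorem getD_dict_pairs (L : List (String × String)) (c : String) :
    (L.foldl (fun d p => d.modify p.2 [] (fun names => names ++ [p.1]))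
        (PySem.Dict.empty : PySem.Dict String (List String))).getD c []
      = (L.filter (fun p => p.2 == c)).map (fun p => p.1) := by
  have hsw : ((L.map Prod.swap).foldl (fun d p => d.modify p.1 [] (fun x => x ++ [p.2]))
        (PySem.Dict.empty : PySem.Dict String (List String)))
      = L.foldl (fun d p => d.modify p.2 [] (fun names => names ++ [p.1])) PySem.Dict.empty := by
    rw [List.foldl_map]; rfl
  rw [← hsw, PySem.Dict.getD_foldl_modify_append]
  simp [List.filter_map, Function.comp_def]

-- ===== VERDICT (by name: the statement is the Claim_ definition above) =====
theorem find_same_surnames_spec : Claim_equal_find_same_surnames := by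
  intro employees _hdom hpre
  unfold Spec_find_same_surnames find_same_surnames find_same_surnames_alt
  rw [dictA_eq employees hpre, pairs_eq_map employees hpre]
  set L := employees.map pvPairFn with hL
  set dA := L.foldl (fun d p => d.modify p.2 [] (fun names => names ++ [p.1]))
      (PySem.Dict.empty : PySem.Dict String (List String)) with hdA
  have hkeys : dA.keys = PySem.Set.ofList (L.map (fun p => p.2)) := by
    rw [hdA, PySem.Dict.keys_foldl_modify_key L (fun p => p.2) [] (fun _ p names => names ++ [p.1])]
    simp [PySem.Set.update_nil_left]
  have hnodup : dA.keys.Nodup := by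
    rw [hkeys]; exact PySem.Set.nodup_ofList _
  have hitems : dA.items = dA.keys.map (fun k => (k, dA.getD k [])) :=
    PySem.Dict.items_eq_map_keys dA hnodup []
  have hsame : dA.items = (PySem.List.dedup (L.map (fun p => p.2))).map
      (fun s => (s, (L.filter (fun p => p.2 == s)).map (fun p => p.1))) := by
    rw [hitems, hkeys, PySem.List.dedup_eq_ofList]
    exact List.map_congr_left (fun k _ => by rw [getD_dict_pairs L k])
  simp only [hsame]
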